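-- pv_equiv track=rewrite | github.com/MatthewDaw/real_estate_location_selection | real_estate_location_selection/scrapers/zillow/zillow_scraper.py | _extract_foreclosure_data
-- ===== SOURCE A (Python) =====
-- def _extract_foreclosure_data(data):
--     keys = [
--         "foreclosureDefaultFilingDate", "foreclosureAuctionFilingDate", "foreclosureLoanDate",
--         "foreclosureLoanOriginator", "foreclosureLoanAmount", "foreclosurePriorSaleDate",
--         "foreclosurePriorSaleAmount", "foreclosureBalanceReportingDate", "foreclosureDefaultDescription",
--         "foreclosurePastDueBalance", "foreclosureUnpaidBalance", "foreclosureAuctionTime",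
--         "foreclosureAuctionDescription", "foreclosureAuctionCity", "foreclosureAuctionLocation",
--         "foreclosureDate", "foreclosureAmount", "foreclosingBank", "foreclosureJudicialType"
--     ]
--     return {k: data.get(k) for k in keys if data.get(k)}
-- ===== SOURCE B (Python) =====
-- _FORECLOSURE_KEYS = [
--     "foreclosureDefaultFilingDate", "foreclosureAuctionFilingDate", "foreclosureLoanDate",
--     "foreclosureLoanOriginator", "foreclosureLoanAmount", "foreclosurePriorSaleDate",
--     "foreclosurePriorSaleAmount", "foreclosureBalanceReportingDate", "foreclosureDefaultDescription",
--     "foreclosurePastDueBalance", "foreclosureUnpaidBalance", "foreclosureAuctionTime",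
--     "foreclosureAuctionDescription", "foreclosureAuctionCity", "foreclosureAuctionLocation",
--     "foreclosureDate", "foreclosureAmount", "foreclosingBank", "foreclosureJudicialType"
-- ]
-- _FORECLOSURE_KEYSET = set(_FORECLOSURE_KEYS)
-- _FORECLOSURE_RANK = {k: i for i, k in enumerate(_FORECLOSURE_KEYS)}
--
--
-- def _extract_foreclosure_data(data):
--     # One pass over the input's items, then order by the fixed key ranking.
--     items = [(k, v) for k, v in data.items() if k in _FORECLOSURE_KEYSET and v]
--     items.sort(key=lambda kv: _FORECLOSURE_RANK[kv[0]])
--     return dict(items)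
-- ===== Notes on version B (the rewrite author's own statement) =====
-- stated objective: alternative
-- what changed: B makes one pass over the input dict's items, filtering by membership in a precomputed key set and truthiness, then orders the kept items by a precomputed key->position rank table, instead of A's probing data.get(k) twice for each key of the fixed 19-key list.
import Mathlib
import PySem

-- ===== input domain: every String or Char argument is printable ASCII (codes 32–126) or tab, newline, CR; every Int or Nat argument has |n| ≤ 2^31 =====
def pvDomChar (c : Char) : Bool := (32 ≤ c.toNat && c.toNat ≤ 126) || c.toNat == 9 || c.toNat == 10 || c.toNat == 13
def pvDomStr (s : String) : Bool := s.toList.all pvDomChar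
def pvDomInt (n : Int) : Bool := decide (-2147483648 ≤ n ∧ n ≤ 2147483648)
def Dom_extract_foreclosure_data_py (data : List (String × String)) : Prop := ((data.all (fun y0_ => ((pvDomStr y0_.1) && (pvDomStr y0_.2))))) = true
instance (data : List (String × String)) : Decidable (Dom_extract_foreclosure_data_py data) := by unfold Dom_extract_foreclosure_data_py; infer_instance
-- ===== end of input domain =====

-- B filters the input's items once (set membership + truthiness) and orders them by a precomputed
-- rank table, instead of probing the input twice per key of the fixed list: 'alternative' objective.
-- Return-value equivalence only; neither version mutates its argument.

-- ===== PORT A =====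
def fcKeys : List String := [
  "foreclosureDefaultFilingDate", "foreclosureAuctionFilingDate", "foreclosureLoanDate",
  "foreclosureLoanOriginator", "foreclosureLoanAmount", "foreclosurePriorSaleDate",
  "foreclosurePriorSaleAmount", "foreclosureBalanceReportingDate", "foreclosureDefaultDescription",
  "foreclosurePastDueBalance", "foreclosureUnpaidBalance", "foreclosureAuctionTime",
  "foreclosureAuctionDescription", "foreclosureAuctionCity", "foreclosureAuctionLocation",
  "foreclosureDate", "foreclosureAmount", "foreclosingBank", "foreclosureJudicialType"]

-- {k: data.get(k) for k in keys if data.get(k)} ; a missing key (get -> None) and "" are both falsy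
def extract_foreclosure_data_py (data : List (String × String)) : List (String × String) :=
  (fcKeys.foldl (fun d k =>
      match (PySem.Dict.mk data).get? k with
      | some v => if v ≠ "" then d.insert k v else d
      | none => d) PySem.Dict.empty).items

-- ===== PORT B =====
def fcKeySet : PySem.Set String := PySem.Set.ofList fcKeys

-- _FORECLOSURE_RANK = {k: i for i, k in enumerate(_FORECLOSURE_KEYS)}
def fcRank : PySem.Dict String Int :=
  (PySem.List.enumerate fcKeys).foldl (fun d p => d.insert p.2 p.1) PySem.Dict.empty

-- _FORECLOSURE_RANK[kv[0]]: every filtered key is in the rank dict, so the KeyError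
-- branch is unreachable; ported with getD 0 (exact on all reachable inputs)
def extract_foreclosure_data_py_alt (data : List (String × String)) : List (String × String) :=
  (PySem.Dict.ofList (PySem.List.sorted
      (data.filter (fun kv => decide (kv.1 ∈ fcKeySet) && decide (kv.2 ≠ "")))
      (fun kv => (fcRank.get? kv.1).getD 0))).items

-- ===== PRECONDITION & SPEC =====
-- Pre_ excludes association lists with duplicate keys: the argument is a Python dict, whose keys
-- are necessarily distinct, so a duplicate-key list represents no input of the Python programs.
def Pre_extract_foreclosure_data_py (data : List (String × String)) : Prop :=
  (data.map Prod.fst).Nodup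
instance (data : List (String × String)) : Decidable (Pre_extract_foreclosure_data_py data) := by
  unfold Pre_extract_foreclosure_data_py; infer_instance

def pvWitness_extract_foreclosure_data_py : (List (String × String)) :=
  [("foreclosureDate", "2020-01-01"), ("zpid", "123"), ("foreclosingBank", "")]

def Spec_extract_foreclosure_data_py (data : List (String × String)) (out : List (String × String)) : Prop := out = extract_foreclosure_data_py_alt data
instance (data : List (String × String)) (out : List (String × String)) : Decidable (Spec_extract_foreclosure_data_py data out) := by unfold Spec_extract_foreclosure_data_py; infer_instance

-- ===== CLAIM (what is proved, stated in full; the proofs are below) =====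
def Claim_equal_extract_foreclosure_data_py : Prop := ∀ (data : List (String × String)), Dom_extract_foreclosure_data_py data → Pre_extract_foreclosure_data_py data → Spec_extract_foreclosure_data_py data (extract_foreclosure_data_py data)

-- ===== LEMMAS AND PROOFS =====

lemma fcKeys_nodup : fcKeys.Nodup := by decide

-- the per-key yield of A's dict comprehension
def fcF (data : List (String × String)) (k : String) : Option (String × String) :=
  match (PySem.Dict.mk data).get? k with
  | some v => if v ≠ "" then some (k, v) else none
  | none => none

-- Boolean version of "A keeps key k"
def fcP (data : List (String × String)) (k : String) : Bool :=
  match (PySem.Dict.mk data).get? k with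
  | some v => decide (v ≠ "")
  | none => false

lemma foldlA (data : List (String × String)) :
    ∀ (L : List String) (d : PySem.Dict String String),
      L.Nodup → (∀ k ∈ L, d.contains k = false) →
      (L.foldl (fun d k =>
          match (PySem.Dict.mk data).get? k with
          | some v => if v ≠ "" then d.insert k v else d
          | none => d) d).items = d.items ++ L.filterMap (fcF data)
  | [], d, _, _ => by simp
  | k :: L, d, hnd, hfresh => by
    have hnd' : L.Nodup := hnd.of_cons
    have hk : k ∉ L := (List.nodup_cons.mp hnd).1
    have hrest : ∀ k' ∈ L, d.contains k' = false :=
      fun k' hk' => hfresh k' (List.mem_cons_of_mem _ hk')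
    simp only [List.foldl_cons, List.filterMap_cons]
    cases h : (PySem.Dict.mk data).get? k with
    | none =>
      rw [foldlA data L d hnd' hrest]
      simp [fcF, h]
    | some v =>
      by_cases hv : v = ""
      · subst hv
        show (List.foldl _ d L).items = d.items ++ _
        rw [foldlA data L d hnd' hrest]
        simp [fcF, h]
      · have hfr : d.contains k = false := hfresh k List.mem_cons_self
        have hfresh' : ∀ k' ∈ L, (d.insert k v).contains k' = false := by
          intro k' hk'
          rw [PySem.Dict.contains_insert]
          have hne : k' ≠ k := by rintro rfl; exact hk hk'
          simp [hne, hrest k' hk']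
        have hacc : (if v ≠ "" then d.insert k v else d) = d.insert k v := by simp [hv]
        show (List.foldl _ (if v ≠ "" then d.insert k v else d) L).items = d.items ++ _
        rw [hacc, foldlA data L (d.insert k v) hnd' hfresh',
            PySem.Dict.items_insert_of_not_contains d v hfr]
        simp [fcF, h, hv]

-- A's result, characterised
def fcT (data : List (String × String)) : List (String × String) :=
  fcKeys.filterMap (fcF data)

lemma A_eq_T (data : List (String × String)) :
    extract_foreclosure_data_py data = fcT data := by
  unfold extract_foreclosure_data_py fcT
  rw [foldlA data fcKeys PySem.Dict.empty fcKeys_nodup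
        (fun k _ => PySem.Dict.contains_empty k)]
  rfl

lemma map_fst_filterMap (data : List (String × String)) (L : List String) :
    (L.filterMap (fcF data)).map Prod.fst = L.filter (fcP data) := by
  induction L with
  | nil => simp
  | cons k L ih =>
    cases h : (PySem.Dict.mk data).get? k with
    | none =>
      have hF : fcF data k = none := by simp [fcF, h]
      have hP : fcP data k = false := by simp [fcP, h]
      simp [hF, hP, ih]
    | some v =>
      by_cases hv : v = ""
      · have hF : fcF data k = none := by simp [fcF, h, hv]
        have hP : fcP data k = false := by simp [fcP, h, hv]
        simp [hF, hP, ih]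
      · have hF : fcF data k = some (k, v) := by simp [fcF, h, hv]
        have hP : fcP data k = true := by simp [fcP, h, hv]
        simp [hF, hP, ih]

lemma mem_T (data : List (String × String)) (p : String × String) :
    p ∈ fcT data ↔ p.1 ∈ fcKeys ∧ (PySem.Dict.mk data).get? p.1 = some p.2 ∧ p.2 ≠ "" := by
  unfold fcT
  rw [List.mem_filterMap]
  constructor
  · rintro ⟨k, hkmem, hf⟩
    cases h : (PySem.Dict.mk data).get? k with
    | none => simp [fcF, h] at hf
    | some v =>
      by_cases hv : v = ""
      · simp [fcF, h, hv] at hf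
      · have hF : fcF data k = some (k, v) := by simp [fcF, h, hv]
        rw [hF] at hf
        cases hf
        exact ⟨hkmem, h, hv⟩
  · rintro ⟨hmem, hget, hne⟩
    exact ⟨p.1, hmem, by simp [fcF, hget, hne]⟩

lemma nodup_T (data : List (String × String)) : (fcT data).Nodup := by
  apply List.Nodup.of_map Prod.fst
  rw [fcT, map_fst_filterMap]
  exact fcKeys_nodup.filter _

lemma filter_pairwise_idxOf (L : List String) (P : String → Bool) (h : L.Nodup) :
    (L.filter P).Pairwise (fun a b => L.idxOf a < L.idxOf b) := by
  induction L with
  | nil => simp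
  | cons x L ih =>
    have hx : x ∉ L := (List.nodup_cons.mp h).1
    have hnd : L.Nodup := h.of_cons
    have lift : (L.filter P).Pairwise (fun a b => (x :: L).idxOf a < (x :: L).idxOf b) := by
      refine (ih hnd).imp_of_mem ?_
      intro a b ha hb hab
      have ha' : a ∈ L := List.mem_of_mem_filter ha
      have hb' : b ∈ L := List.mem_of_mem_filter hb
      have hax : (x == a) = false := by
        rw [beq_eq_false_iff_ne]; rintro rfl; exact hx ha'
      have hbx : (x == b) = false := by
        rw [beq_eq_false_iff_ne]; rintro rfl; exact hx hb'
      simp only [List.idxOf_cons, hax, hbx, cond_false]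
      omega
    rw [List.filter_cons]
    by_cases hP : P x
    · rw [if_pos hP]
      refine List.Pairwise.cons ?_ lift
      intro b hb
      have hb' : b ∈ L := List.mem_of_mem_filter hb
      have hbx : (x == b) = false := by
        rw [beq_eq_false_iff_ne]; rintro rfl; exact hx hb'
      simp only [List.idxOf_cons, hbx, cond_false, beq_self_eq_true, cond_true]
      omega
    · rw [if_neg hP]; exact lift

lemma rank_eq_idxOf : ∀ a ∈ fcKeys, (fcRank.get? a).getD 0 = (fcKeys.idxOf a : Int) := by decide

lemma pairwise_T (data : List (String × String)) :
    (fcT data).Pairwise (fun a b => (fcRank.get? a.1).getD 0 < (fcRank.get? b.1).getD 0) := by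
  have h1 : ((fcT data).map Prod.fst).Pairwise
      (fun a b => (fcRank.get? a).getD 0 < (fcRank.get? b).getD 0) := by
    rw [fcT, map_fst_filterMap]
    refine (filter_pairwise_idxOf fcKeys (fcP data) fcKeys_nodup).imp_of_mem ?_
    intro a b ha hb hab
    have ha' : a ∈ fcKeys := List.mem_of_mem_filter ha
    have hb' : b ∈ fcKeys := List.mem_of_mem_filter hb
    rw [rank_eq_idxOf a ha', rank_eq_idxOf b hb']
    exact_mod_cast hab
  exact (List.pairwise_map (l := fcT data) (f := Prod.fst)
    (R := fun a b => (fcRank.get? a).getD 0 < (fcRank.get? b).getD 0)).mp h1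

lemma perm_T (data : List (String × String)) (hpre : (data.map Prod.fst).Nodup) :
    (fcT data).Perm (data.filter (fun kv => decide (kv.1 ∈ fcKeySet) && decide (kv.2 ≠ ""))) := by
  have hdata : data.Nodup := List.Nodup.of_map Prod.fst hpre
  have hkeys : (PySem.Dict.mk data).keys.Nodup := by
    rw [PySem.Dict.keys_mk]; exact hpre
  rw [List.perm_ext_iff_of_nodup (nodup_T data) (hdata.filter _)]
  intro p
  rw [mem_T, List.mem_filter]
  have hget : (PySem.Dict.mk data).get? p.1 = some p.2 ↔ (p.1, p.2) ∈ data :=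
    PySem.Dict.get?_eq_some_iff_mem_items _ _ _ hkeys
  constructor
  · rintro ⟨hkmem, hg, hne⟩
    refine ⟨by simpa using hget.mp hg, ?_⟩
    simp [PySem.Set.mem_ofList, fcKeySet, hkmem, hne]
  · rintro ⟨hmem, hcond⟩
    simp only [Bool.and_eq_true, decide_eq_true_eq] at hcond
    obtain ⟨hks, hne⟩ := hcond
    have hkmem : p.1 ∈ fcKeys := (PySem.Set.mem_ofList _ _).mp hks
    exact ⟨hkmem, hget.mpr (by simpa using hmem), hne⟩

lemma items_ofList_T (data : List (String × String)) :
    (PySem.Dict.ofList (fcT data)).items = fcT data := by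
  have h := PySem.Dict.items_foldl_insert_fresh (fcT data) Prod.fst Prod.snd PySem.Dict.empty
      (fun a _ => PySem.Dict.contains_empty a.1)
      (by rw [fcT, map_fst_filterMap]; exact fcKeys_nodup.filter _)
  unfold PySem.Dict.ofList PySem.Dict.update
  simpa using h

-- ===== VERDICT (by name: the statement is the Claim_ definition above) =====
theorem extract_foreclosure_data_py_spec : Claim_equal_extract_foreclosure_data_py := by
  intro data _ hpre
  unfold Spec_extract_foreclosure_data_py extract_foreclosure_data_py_alt
  rw [PySem.List.sorted_eq_of_perm_of_pairwise_lt _ (fcT data) _ (perm_T data hpre) (pairwise_T data),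
      items_ofList_T, A_eq_T]
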